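-- pv_equiv track=rewrite | github.com/Guillermo-maker/AED_UTN_2024 | A.E.D/segundo_parcial/413391_Andino.py | palabras_con_d_vocal
-- ===== SOURCE A (Python) =====
-- def palabras_con_d_vocal(archivo_leido):
--     palabras = archivo_leido.split()
--     r4 = 0
--
--     for car in palabras:
--         d_count = 0
--         tiene_vocal_final = False
--
--         # Verificar si la palabra termina con una vocal
--         if car[-1] in "AEIOUaeiou":
--             tiene_vocal_final = True
--
--         # Contar las ocurrencias de "d" seguida de una vocal
--         i = 0
--         while i < len(car) - 1:
--             if car[i].lower() == 'd' and car[i + 1].lower() in "aeiou":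
--                 d_count += 1
--                 i += 2  # Saltar al siguiente carácter después de la vocal
--             else:
--                 i += 1
--
--         # Si tiene más de una ocurrencia de "d" + vocal y termina con vocal, contarla
--         if d_count >= 2 and tiene_vocal_final:
--             r4 += 1
--
--     return r4
-- ===== SOURCE B (Python) =====
-- def palabras_con_d_vocal(archivo_leido):
--     vocales = "aeiou"
--     return sum(
--         1
--         for p in archivo_leido.split()
--         if p[-1].lower() in vocales
--         and sum(
--             1 for a, b in zip(p, p[1:])
--             if a.lower() == 'd' and b.lower() in vocales
--         ) >= 2
--     )
-- ===== Notes on version B (the rewrite author's own statement) =====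
-- stated objective: simpler
-- what changed: A's per-word index-jumping while loop (skip 2 on a match, 1 otherwise) with explicit counters and flags is replaced by one flat generator-sum comprehension: count the words whose last letter lowercased is a vowel and whose adjacent-pair list zip(p, p[1:]) contains at least two d-plus-vowel pairs (such matches can never overlap, since a match ends on a vowel).
import Mathlib
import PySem

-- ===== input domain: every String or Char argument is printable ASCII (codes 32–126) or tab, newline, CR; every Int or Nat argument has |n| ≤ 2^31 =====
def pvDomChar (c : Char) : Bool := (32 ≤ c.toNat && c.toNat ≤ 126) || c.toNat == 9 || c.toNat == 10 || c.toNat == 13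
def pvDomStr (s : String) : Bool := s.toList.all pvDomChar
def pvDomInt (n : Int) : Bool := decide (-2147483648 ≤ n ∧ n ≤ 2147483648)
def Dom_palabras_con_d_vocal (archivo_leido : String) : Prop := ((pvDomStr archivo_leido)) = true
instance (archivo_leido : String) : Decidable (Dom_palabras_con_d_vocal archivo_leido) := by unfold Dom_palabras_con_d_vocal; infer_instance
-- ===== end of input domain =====

-- B replaces A's index-jumping while loop and manual counter with one flat comprehension:
-- count the words whose last letter is a vowel and whose adjacent pairs zip(p, p[1:])
-- contain at least two 'd'+vowel pairs (objective: simpler; return value only, no side effects).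

-- ===== PORT A =====
-- A's 'while i < len(car) - 1' loop: on a match count and skip two characters, else one.
-- 'x in "aeiou"' on a single character is ported as membership in the list of its characters (exact).
def pvWCount : List Char → Nat
  | c1 :: c2 :: rest =>
      if PySem.Chars.lowerChar c1 = 'd' ∧ PySem.Chars.lowerChar c2 ∈ (['a','e','i','o','u'] : List Char) then
        pvWCount rest + 1
      else
        pvWCount (c2 :: rest)
  | _ => 0

-- car[-1] in "AEIOUaeiou" (on a single character: membership in the list of those characters, exact)
def pvEndsVowelA (car : String) : Bool :=
  match PySem.List.pyGet? car.toList (-1) with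
  | some c => decide (c ∈ (['A','E','I','O','U','a','e','i','o','u'] : List Char))
  | none => false   -- unreachable: split() yields nonempty words

-- the body of A's 'for car in palabras' loop, acting on the accumulator r4
def pvStepA (r4 : Int) (car : String) : Int :=
  let tiene_vocal_final : Bool := pvEndsVowelA car
  let d_count : Nat := pvWCount car.toList
  if 2 ≤ d_count ∧ tiene_vocal_final = true then r4 + 1 else r4

def palabras_con_d_vocal (archivo_leido : String) : Int :=
  let palabras := PySem.Str.split₀ archivo_leido
  palabras.foldl pvStepA 0

-- ===== PORT B =====
-- a.lower() == 'd' and b.lower() in vocales, for a pair (a, b) from zip(p, p[1:])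
def pvPairHit (p : Char × Char) : Bool :=
  PySem.Chars.lowerChar p.1 == 'd' && decide (PySem.Chars.lowerChar p.2 ∈ (['a','e','i','o','u'] : List Char))

-- the per-word filter of B's comprehension
def pvWordOk (p : String) : Bool :=
  (match PySem.List.pyGet? p.toList (-1) with
   | some c => decide (PySem.Chars.lowerChar c ∈ (['a','e','i','o','u'] : List Char))  -- p[-1].lower() in vocales
   | none => false)   -- unreachable: split() yields nonempty words
  && decide (2 ≤ ((p.toList.zip (PySem.List.slice p.toList (some 1) none)).countP pvPairHit))

def palabras_con_d_vocal_alt (archivo_leido : String) : Int :=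
  ((PySem.Str.split₀ archivo_leido).countP pvWordOk : Nat)

-- ===== PRECONDITION & SPEC =====
def Spec_palabras_con_d_vocal (archivo_leido : String) (out : Int) : Prop := out = palabras_con_d_vocal_alt archivo_leido
instance (archivo_leido : String) (out : Int) : Decidable (Spec_palabras_con_d_vocal archivo_leido out) := by unfold Spec_palabras_con_d_vocal; infer_instance

-- ===== CLAIM (what is proved, stated in full; the proofs are below) =====
def Claim_equal_palabras_con_d_vocal : Prop := ∀ (archivo_leido : String), Dom_palabras_con_d_vocal archivo_leido → Spec_palabras_con_d_vocal archivo_leido (palabras_con_d_vocal archivo_leido)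

-- ===== LEMMAS AND PROOFS =====

theorem pv_char_eq_iff (a b : Char) : a = b ↔ a.toNat = b.toNat := by
  constructor
  · intro h; rw [h]
  · intro h; exact Char.ext (UInt32.toNat_inj.mp h)

theorem pv_toNat_ofNat (n : Nat) (h : n < 55296) : (Char.ofNat n).toNat = n := by
  unfold Char.ofNat
  rw [dif_pos (Or.inl h)]
  simp [Char.ofNatAux, Char.toNat]

-- lowercasing first, then testing 'aeiou', is the same as testing both cases at once
theorem pv_vowel_lower (c : Char) :
    (PySem.Chars.lowerChar c ∈ (['a','e','i','o','u'] : List Char)) ↔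
    (c ∈ (['A','E','I','O','U','a','e','i','o','u'] : List Char)) := by
  simp only [PySem.Chars.lowerChar, PySem.Chars.isupper]
  split_ifs with h
  · simp only [Bool.and_eq_true, decide_eq_true_eq, Char.le_def, UInt32.le_iff_toNat_le] at h
    have h1 : 65 ≤ c.toNat := h.1
    have h2 : c.toNat ≤ 90 := h.2
    simp only [List.mem_cons, List.not_mem_nil, or_false, pv_char_eq_iff,
      pv_toNat_ofNat (c.toNat + 32) (by omega)]
    simp only [show ('A':Char).toNat = 65 from rfl, show ('A':Char).val.toNat = 65 from rfl, show ('E':Char).toNat = 69 from rfl, show ('E':Char).val.toNat = 69 from rfl, show ('I':Char).toNat = 73 from rfl, show ('I':Char).val.toNat = 73 from rfl, show ('O':Char).toNat = 79 from rfl, show ('O':Char).val.toNat = 79 from rfl, show ('U':Char).toNat = 85 from rfl, show ('U':Char).val.toNat = 85 from rfl, show ('a':Char).toNat = 97 from rfl, show ('a':Char).val.toNat = 97 from rfl, show ('e':Char).toNat = 101 from rfl, show ('e':Char).val.toNat = 101 from rfl, show ('i':Char).toNat = 105 from rfl, show ('i':Char).val.toNat = 105 from rfl, show ('o':Char).toNat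 = 111 from rfl, show ('o':Char).val.toNat = 111 from rfl, show ('u':Char).toNat = 117 from rfl, show ('u':Char).val.toNat = 117 from rfl, show ('d':Char).toNat = 100 from rfl, show ('d':Char).val.toNat = 100 from rfl, show ('D':Char).toNat = 68 from rfl, show ('D':Char).val.toNat = 68 from rfl, show ('Z':Char).toNat = 90 from rfl, show ('Z':Char).val.toNat = 90 from rfl, Char.toNat_val] at *
    omega
  · simp only [Bool.and_eq_true, decide_eq_true_eq, Char.le_def, UInt32.le_iff_toNat_le,
      not_and, not_le] at h
    simp only [List.mem_cons, List.not_mem_nil, or_false, pv_char_eq_iff]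
    simp only [show ('A':Char).toNat = 65 from rfl, show ('A':Char).val.toNat = 65 from rfl, show ('E':Char).toNat = 69 from rfl, show ('E':Char).val.toNat = 69 from rfl, show ('I':Char).toNat = 73 from rfl, show ('I':Char).val.toNat = 73 from rfl, show ('O':Char).toNat = 79 from rfl, show ('O':Char).val.toNat = 79 from rfl, show ('U':Char).toNat = 85 from rfl, show ('U':Char).val.toNat = 85 from rfl, show ('a':Char).toNat = 97 from rfl, show ('a':Char).val.toNat = 97 from rfl, show ('e':Char).toNat = 101 from rfl, show ('e':Char).val.toNat = 101 from rfl, show ('i':Char).toNat = 105 from rfl, show ('i':Char).val.toNat = 105 from rfl, show ('o':Char).toNat = 111 from rfl, show ('o':Char).val.toNat = 111 from rfl, show ('u':Char).toNat = 117 from rfl, show ('u':Char).val.toNat = 117 from rfl, show ('d':Char).toNat = 100 from rfl, show ('d':Char).val.toNat = 100 from rfl, show ('D':Char).toNat = 68 from rfl, show ('D':Char).val.toNat = 68 from rfl, show ('Z':Char).toNat = 90 from rfl, show ('Z':Char).val.toNat = 90 from rfl, Char.toNat_val] at *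
    omega

theorem pv_lower_ne_d (c : Char)
    (h : PySem.Chars.lowerChar c ∈ (['a','e','i','o','u'] : List Char)) :
    PySem.Chars.lowerChar c ≠ 'd' := by
  intro hd
  rw [hd] at h
  simp at h

-- A's skip-two loop counts exactly the adjacent 'd'+vowel pairs: a match ends on a vowel,
-- so no second match can start inside it
theorem pv_wcount_eq (cs : List Char) :
    pvWCount cs = (cs.zip cs.tail).countP pvPairHit := by
  induction cs using pvWCount.induct with
  | case1 c1 c2 rest h ih =>
    rw [pvWCount]
    simp only [if_pos h]
    have hhit : pvPairHit (c1, c2) = true := by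
      simp [pvPairHit, h.1, h.2]
    have hmid : ((c2 :: rest).zip rest).countP pvPairHit = (rest.zip rest.tail).countP pvPairHit := by
      cases rest with
      | nil => simp
      | cons r rs =>
        have hmiss : pvPairHit (c2, r) = false := by
          simp only [pvPairHit, Bool.and_eq_false_iff, beq_eq_false_iff_ne]
          exact Or.inl (pv_lower_ne_d c2 h.2)
        simp [List.countP_cons, hmiss]
    simp only [List.tail_cons, List.zip_cons_cons, List.countP_cons, hhit, if_true]
    omega
  | case2 c1 c2 rest h ih =>
    rw [pvWCount]
    simp only [if_neg h]
    have hmiss : pvPairHit (c1, c2) = false := by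
      simp only [pvPairHit, Bool.and_eq_false_iff, beq_eq_false_iff_ne, decide_eq_false_iff_not]
      by_cases hd : PySem.Chars.lowerChar c1 = 'd'
      · exact Or.inr (fun hv => h ⟨hd, hv⟩)
      · exact Or.inl hd
    simp only [List.tail_cons, List.zip_cons_cons, List.countP_cons, hmiss]
    simpa using ih
  | case3 cs h =>
    cases cs with
    | nil => simp [pvWCount]
    | cons a tl =>
      cases tl with
      | nil => simp [pvWCount]
      | cons b tl2 => exact absurd rfl (h a b tl2)

-- the two per-word tests coincide
theorem pv_word_eq (car : String) :
    (2 ≤ pvWCount car.toList ∧ pvEndsVowelA car = true) ↔ pvWordOk car = true := by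
  rw [pvWordOk, pvEndsVowelA]
  rw [PySem.List.slice_from_one]
  simp only [Bool.and_eq_true, decide_eq_true_eq]
  rw [pv_wcount_eq, and_comm]
  apply and_congr
  · cases hg : PySem.List.pyGet? car.toList (-1) with
    | none => simp
    | some c => simp [pv_vowel_lower c]
  · exact Iff.rfl

-- ===== VERDICT (by name: the statement is the Claim_ definition above) =====
theorem palabras_con_d_vocal_spec : Claim_equal_palabras_con_d_vocal := by
  intro s _
  unfold Spec_palabras_con_d_vocal palabras_con_d_vocal palabras_con_d_vocal_alt
  have hstep :
      pvStepA = (fun (r4 : Int) (car : String) => if pvWordOk car = true then r4 + 1 else r4) := by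
    funext r4 car
    simp only [pvStepA]
    by_cases h : pvWordOk car = true
    · rw [if_pos ((pv_word_eq car).mpr h), if_pos h]
    · rw [if_neg (fun hc => h ((pv_word_eq car).mp hc)), if_neg h]
  rw [hstep, PySem.List.foldl_count_if pvWordOk (PySem.Str.split₀ s) 0]
  simp
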